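-- pv_equiv track=rewrite | github.com/mauriciocucco/gaia | src/hf_gaia_agent/evidence_solver.py | _split_pipe_table_segments
-- ===== SOURCE A (Python) =====
-- def _split_pipe_table_segments(rows: list[list[str]]) -> list[list[list[str]]]:
--     segments: list[list[list[str]]] = []
--     current: list[list[str]] = []
--     expected_width: int | None = None
--     for row in rows:
--         width = len(row)
--         if width < 2:
--             if len(current) >= 2:
--                 segments.append(current)
--             current = []
--             expected_width = None
--             continue
--         if not current:
--             current = [row]
--             expected_width = width
--             continue
--         if expected_width is not None and width != expected_width:
--             if len(current) >= 2:
--                 segments.append(current)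
--             current = [row]
--             expected_width = width
--             continue
--         current.append(row)
--     if len(current) >= 2:
--         segments.append(current)
--     return segments
-- ===== SOURCE B (Python) =====
-- def _pipe_runs(rows):
--     """Maximal runs of consecutive rows with equal width."""
--     runs = []
--     i, n = 0, len(rows)
--     while i < n:
--         w = len(rows[i])
--         j = i + 1
--         while j < n and len(rows[j]) == w:
--             j += 1
--         runs.append(rows[i:j])
--         i = j
--     return runs
--
--
-- def _split_pipe_table_segments(rows):
--     return [g for g in _pipe_runs(rows) if len(g[0]) >= 2 and len(g) >= 2]
-- ===== Notes on version B (the rewrite author's own statement) =====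
-- stated objective: simpler
-- what changed: Replaces A's single loop with current/expected_width accumulator state by a two-phase group-then-filter pipeline: first split the rows into maximal runs of consecutive equal-width rows, then keep exactly the runs whose width and length are both >= 2.
import Mathlib
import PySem

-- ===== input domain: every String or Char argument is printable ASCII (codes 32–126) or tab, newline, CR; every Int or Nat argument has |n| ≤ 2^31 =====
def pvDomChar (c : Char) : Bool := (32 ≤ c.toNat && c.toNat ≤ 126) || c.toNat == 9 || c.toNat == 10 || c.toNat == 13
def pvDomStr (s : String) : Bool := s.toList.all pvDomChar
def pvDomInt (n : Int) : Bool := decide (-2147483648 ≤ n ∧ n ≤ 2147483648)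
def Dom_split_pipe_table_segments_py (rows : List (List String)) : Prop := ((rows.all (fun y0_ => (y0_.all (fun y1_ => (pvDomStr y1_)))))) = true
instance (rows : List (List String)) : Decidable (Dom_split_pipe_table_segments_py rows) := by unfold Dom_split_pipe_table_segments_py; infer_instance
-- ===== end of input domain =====

-- B replaces A's accumulator loop (current/expected_width) by a two-phase group-then-filter
-- pipeline (maximal equal-width runs, then keep runs with width >= 2 and length >= 2); simpler, same cost.


-- ===== PORT A =====
-- A's loop, with state (segments, current, expected_width); branches in source order.
def pvALoop : List (List String) → List (List (List String)) → List (List String) → Option Nat → List (List (List String))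
  | [], segments, current, _ =>
      if 2 ≤ current.length then segments ++ [current] else segments
  | row :: rest, segments, current, ew =>
      let width := row.length
      if width < 2 then
        pvALoop rest (if 2 ≤ current.length then segments ++ [current] else segments) [] none
      else if current.isEmpty then
        pvALoop rest segments [row] (some width)
      else
        match ew with
        | some e =>
            if width ≠ e then
              pvALoop rest (if 2 ≤ current.length then segments ++ [current] else segments) [row] (some width)
            else
              pvALoop rest segments (current ++ [row]) ew
        | none => pvALoop rest segments (current ++ [row]) ew

def split_pipe_table_segments_py (rows : List (List String)) : List (List (List String)) :=
  pvALoop rows [] [] none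

-- ===== PORT B =====
-- phase 1: maximal runs of consecutive rows of equal width (inner while = takeWhile/dropWhile)
def pvPipeRuns : List (List String) → List (List (List String))
  | [] => []
  | r :: rest =>
      (r :: rest.takeWhile (fun x => x.length == r.length)) ::
        pvPipeRuns (rest.dropWhile (fun x => x.length == r.length))
  termination_by l => l.length
  decreasing_by
    simp only [List.length_cons]
    exact Nat.lt_succ_of_le (List.length_dropWhile_le _ _)

-- phase 2: keep runs whose width and length are both ≥ 2
def split_pipe_table_segments_py_alt (rows : List (List String)) : List (List (List String)) :=
  (pvPipeRuns rows).filter (fun g => decide (2 ≤ (g.headD []).length) && decide (2 ≤ g.length))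

-- ===== PRECONDITION & SPEC =====
def Spec_split_pipe_table_segments_py (rows : List (List String)) (out : List (List (List String))) : Prop := out = split_pipe_table_segments_py_alt rows
instance (rows : List (List String)) (out : List (List (List String))) : Decidable (Spec_split_pipe_table_segments_py rows out) := by unfold Spec_split_pipe_table_segments_py; infer_instance

-- ===== CLAIM (what is proved, stated in full; the proofs are below) =====
def Claim_equal_split_pipe_table_segments_py : Prop := ∀ (rows : List (List String)), Dom_split_pipe_table_segments_py rows → Spec_split_pipe_table_segments_py rows (split_pipe_table_segments_py rows)

-- ===== LEMMAS AND PROOFS =====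

theorem filter_if_helper {α : Type} (A B : Prop) [Decidable A] [Decidable B] (g : α) (F : List α) :
    (if (decide A && decide B) = true then g :: F else F) = (if A ∧ B then [g] else []) ++ F := by
  by_cases hA : A <;> by_cases hB : B <;> simp [hA, hB]

theorem alt_nil : split_pipe_table_segments_py_alt [] = [] := by
  simp [split_pipe_table_segments_py_alt, pvPipeRuns]

theorem alt_cons (r : List String) (rest : List (List String)) :
    split_pipe_table_segments_py_alt (r :: rest) =
      (if 2 ≤ r.length ∧ 2 ≤ (r :: rest.takeWhile (fun x => x.length == r.length)).length
        then [r :: rest.takeWhile (fun x => x.length == r.length)] else []) ++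
      split_pipe_table_segments_py_alt (rest.dropWhile (fun x => x.length == r.length)) := by
  simp only [split_pipe_table_segments_py_alt]
  rw [pvPipeRuns, List.filter_cons]
  simp only [List.headD_cons]
  exact filter_if_helper _ _ _ _

-- narrow runs vanish: dropping a width-(<2) run does not change the result
theorem alt_dropWhile_narrow (w : Nat) (hw : w < 2) (rest : List (List String)) :
    split_pipe_table_segments_py_alt rest =
      split_pipe_table_segments_py_alt (rest.dropWhile (fun x => x.length == w)) := by
  cases rest with
  | nil => simp
  | cons a t =>
    by_cases ha : a.length = w
    · subst ha
      rw [alt_cons]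
      have h1 : ¬ 2 ≤ a.length := by omega
      simp [h1, List.dropWhile]
    · have : (fun x => x.length == w) a = false := by simp [ha]
      simp [List.dropWhile, this]

-- the combined induction: L1 (empty accumulator) and L2 (nonempty accumulator of width e ≥ 2)
theorem pvALoop_main : ∀ (n : Nat) (rows : List (List String)), rows.length ≤ n →
    (∀ segs, pvALoop rows segs [] none = segs ++ split_pipe_table_segments_py_alt rows) ∧
    (∀ segs (cur : List (List String)) (e : Nat), cur ≠ [] → (cur.headD []).length = e → 2 ≤ e →
      pvALoop rows segs cur (some e) =
        segs ++
          (if 2 ≤ (cur ++ rows.takeWhile (fun x => x.length == e)).length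
            then [cur ++ rows.takeWhile (fun x => x.length == e)] else []) ++
          split_pipe_table_segments_py_alt (rows.dropWhile (fun x => x.length == e))) := by
  intro n
  induction n with
  | zero =>
    intro rows hlen
    have : rows = [] := List.eq_nil_of_length_eq_zero (Nat.le_zero.mp hlen)
    subst this
    constructor
    · intro segs; simp [pvALoop, alt_nil]
    · intro segs cur e _ _ _
      simp only [pvALoop, List.takeWhile, List.dropWhile, List.append_nil, alt_nil]
      split_ifs <;> simp_all
  | succ m ih =>
    intro rows hlen
    cases rows with
    | nil =>
      constructor
      · intro segs; simp [pvALoop, alt_nil]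
      · intro segs cur e _ _ _
        simp only [pvALoop, List.takeWhile, List.dropWhile, List.append_nil, alt_nil]
        split_ifs <;> simp_all
    | cons row rest =>
      have hrest : rest.length ≤ m := by simpa using Nat.succ_le_succ_iff.mp (by simpa using hlen)
      constructor
      · -- L1
        intro segs
        by_cases hw : row.length < 2
        · have hdrop := alt_dropWhile_narrow row.length hw rest
          have halt : split_pipe_table_segments_py_alt (row :: rest) =
              split_pipe_table_segments_py_alt rest := by
            rw [alt_cons]
            have h1 : ¬ 2 ≤ row.length := by omega
            simp [h1, ← hdrop]
          rw [halt]
          simp only [pvALoop, if_pos hw]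
          simpa using (ih rest hrest).1 segs
        · have hw2 : 2 ≤ row.length := by omega
          simp only [pvALoop, if_neg hw, List.isEmpty_nil]
          rw [(ih rest hrest).2 segs [row] row.length (by simp) (by simp) hw2]
          rw [alt_cons]
          simp [hw2, List.append_assoc]
      · -- L2
        intro segs cur e hcur hhead he
        by_cases hw : row.length < 2
        · have hne : (fun x => x.length == e) row = false := by
            simp; omega
          simp only [pvALoop, if_pos hw, List.takeWhile_cons, hne, List.dropWhile_cons,
            Bool.false_eq_true, if_false]
          rw [(ih rest hrest).1]
          have hdrop := alt_dropWhile_narrow row.length hw rest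
          have halt : split_pipe_table_segments_py_alt (row :: rest) =
              split_pipe_table_segments_py_alt rest := by
            rw [alt_cons]
            have h1 : ¬ 2 ≤ row.length := by omega
            simp [h1, ← hdrop]
          rw [halt]
          by_cases hc : 2 ≤ cur.length <;> simp [hc]
        · have hcur' : cur.isEmpty = false := by
            cases cur with | nil => simp at hcur | cons a t => simp
          by_cases heq : row.length = e
          · have htw : (fun x => x.length == e) row = true := by simp [heq]
            simp only [pvALoop, if_neg hw, hcur', Bool.false_eq_true, if_false, if_neg (by omega : ¬ row.length ≠ e)]
            rw [(ih rest hrest).2 segs (cur ++ [row]) e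
                (by simp) (by cases cur with | nil => simp at hcur | cons a t => simpa using hhead) he]
            simp [htw, List.append_assoc]
          · have htw : (fun x => x.length == e) row = false := by simp [heq]
            have hw2 : 2 ≤ row.length := by omega
            simp only [pvALoop, if_neg hw, hcur', Bool.false_eq_true, if_false, if_pos heq]
            rw [(ih rest hrest).2 _ [row] row.length (by simp) (by simp) hw2]
            simp only [List.takeWhile_cons, List.dropWhile_cons, htw, Bool.false_eq_true, if_false]
            rw [alt_cons]
            by_cases hc : 2 ≤ cur.length <;>
              by_cases hg : 2 ≤ (row :: List.takeWhile (fun x => x.length == row.length) rest).length <;>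
                simp [hc, hg, hw2, List.append_assoc]

-- ===== VERDICT (by name: the statement is the Claim_ definition above) =====
theorem split_pipe_table_segments_py_spec : Claim_equal_split_pipe_table_segments_py := by
  intro rows _
  show split_pipe_table_segments_py rows = split_pipe_table_segments_py_alt rows
  have := (pvALoop_main rows.length rows le_rfl).1 []
  simpa [split_pipe_table_segments_py] using this
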